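-- pv_equiv track=rewrite | github.com/bigkangaroo123/code_python | CCC_03_S2.py | rhymes
-- ===== SOURCE A (Python) =====
-- def syllable_getter(word):
--     vowels = "aeiou"
--     for i in range(len(word) - 1, -1, -1):
--         if word[i].lower() in vowels:
--             return word[i:].lower()
--     return word.lower()
--
-- def rhymes(verse):
--     syllables = []
--     for line in verse:
--         words = line.split()
--         last_word = words[-1]
--         syllable = syllable_getter(last_word)
--         syllables.append(syllable)
--
--     if syllables[0] == syllables[1] == syllables[2] == syllables[3]:
--         return "perfect"
--     elif syllables[0] == syllables[1] and syllables[2] == syllables[3]: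
--         return "even"
--     elif syllables[0] == syllables[2] and syllables[1] == syllables[3]:
--         return "cross"
--     elif syllables[0] == syllables[3] and syllables[1] == syllables[2]:
--         return "shell"
--     else:
--         return "free"
-- ===== SOURCE B (Python) =====
-- def syllable_getter(word):
--     vowels = "aeiou"
--     for i in range(len(word) - 1, -1, -1):
--         if word[i].lower() in vowels:
--             return word[i:].lower()
--     return word.lower()
--
-- def rhymes(verse):
--     syllables = [syllable_getter(line.split()[-1]) for line in verse]
--     mapping = {}
--     pat = ""
--     for s in syllables[:4]:
--         if s not in mapping:
--             mapping[s] = "ABCD"[len(mapping)]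
--         pat += mapping[s]
--     return {"AAAA": "perfect", "AABB": "even",
--             "ABAB": "cross", "ABBA": "shell"}.get(pat, "free")
-- ===== Notes on version B (the rewrite author's own statement) =====
-- stated objective: simpler
-- what changed: Replaces the chained pairwise-equality if/elif ladder with a canonical rhyme-pattern string (first-seen syllables assigned letters A-D via a dict) looked up in a fixed pattern->name table.
import Mathlib
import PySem

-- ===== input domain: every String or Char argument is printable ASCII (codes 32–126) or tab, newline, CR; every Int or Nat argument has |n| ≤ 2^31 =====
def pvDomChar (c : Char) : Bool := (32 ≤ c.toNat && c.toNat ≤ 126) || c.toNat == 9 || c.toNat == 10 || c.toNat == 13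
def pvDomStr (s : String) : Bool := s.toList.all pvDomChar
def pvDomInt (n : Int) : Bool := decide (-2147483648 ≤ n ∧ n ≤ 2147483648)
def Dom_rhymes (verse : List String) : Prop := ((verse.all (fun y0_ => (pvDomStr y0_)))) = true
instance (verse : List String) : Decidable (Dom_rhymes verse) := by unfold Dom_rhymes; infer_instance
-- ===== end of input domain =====

-- B replaces A's chained pairwise-equality if/elif ladder with a canonical pattern string
-- (letters assigned to first-seen syllables via a dict) looked up in a fixed table; objective: simpler.


-- ===== PORT A =====
-- shared helper (identical function in Source A and Source B): last syllable of a word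
-- loop 'for i in range(len(word)-1, -1, -1)' as recursion over the index list;
-- the 'none' branch of pyGet? is unreachable (i always in range) and only makes the match total
def sgLoop (word : String) : List Int → String
  | [] => PySem.Str.lower word
  | i :: rest =>
    match PySem.Str.pyGet? word i with
    | some c =>
      if PySem.Str.isIn (String.ofList [PySem.Chars.lowerChar c]) "aeiou" then
        PySem.Str.lower (PySem.Str.slice word (some i) none)
      else sgLoop word rest
    | none => sgLoop word rest

def syllable_getter (word : String) : String :=
  sgLoop word (PySem.List.pyRange ((word.length : Int) - 1) (-1) (-1))

-- 'words[-1]' is total here via pyGetD; Pre_rhymes guarantees every line has a word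
def lastSyllable (line : String) : String :=
  syllable_getter (PySem.List.pyGetD (PySem.Str.split₀ line) (-1) "")

def rhymes (verse : List String) : String :=
  let syllables := verse.foldl (fun acc line => acc ++ [lastSyllable line]) []
  -- syllables[0..3] are total via pyGetD; Pre_rhymes guarantees 4 ≤ verse.length
  let s0 := PySem.List.pyGetD syllables 0 ""
  let s1 := PySem.List.pyGetD syllables 1 ""
  let s2 := PySem.List.pyGetD syllables 2 ""
  let s3 := PySem.List.pyGetD syllables 3 ""
  if s0 = s1 ∧ s1 = s2 ∧ s2 = s3 then "perfect"
  else if s0 = s1 ∧ s2 = s3 then "even"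
  else if s0 = s2 ∧ s1 = s3 then "cross"
  else if s0 = s3 ∧ s1 = s2 then "shell"
  else "free"

-- ===== PORT B =====
-- step of Source B's pattern loop: assign the next unused letter to an unseen syllable, append its letter
def patStep (st : PySem.Dict String Char × String) (s : String) : PySem.Dict String Char × String :=
  let d := if st.1.contains s then st.1
           else st.1.insert s (PySem.List.pyGetD "ABCD".toList (st.1.size : Int) 'A')
  (d, st.2.push (d.getD s 'A'))

def patTable : PySem.Dict String String :=
  PySem.Dict.ofList [("AAAA", "perfect"), ("AABB", "even"), ("ABAB", "cross"), ("ABBA", "shell")]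

def rhymes_alt (verse : List String) : String :=
  let syllables := verse.map lastSyllable
  let pat := ((PySem.List.slice syllables none (some 4)).foldl patStep (PySem.Dict.empty, "")).2
  patTable.getD pat "free"

-- ===== PRECONDITION & SPEC =====
-- Pre_ excludes inputs where A raises: verses with fewer than 4 lines (syllables[3] IndexError)
-- and verses containing a line with no words (words[-1] IndexError)
def Pre_rhymes (verse : List String) : Prop :=
  4 ≤ verse.length ∧ ∀ line ∈ verse, PySem.Str.split₀ line ≠ []
instance (verse : List String) : Decidable (Pre_rhymes verse) := by unfold Pre_rhymes; infer_instance

def pvWitness_rhymes : List String := ["a cat", "a bat", "the dog", "a log"]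

def Spec_rhymes (verse : List String) (out : String) : Prop := out = rhymes_alt verse
instance (verse : List String) (out : String) : Decidable (Spec_rhymes verse out) := by unfold Spec_rhymes; infer_instance

-- ===== CLAIM (what is proved, stated in full; the proofs are below) =====
def Claim_equal_rhymes : Prop := ∀ (verse : List String), Dom_rhymes verse → Pre_rhymes verse → Spec_rhymes verse (rhymes verse)

-- ===== LEMMAS AND PROOFS =====
lemma classify_eq (s0 s1 s2 s3 : String) :
    (if s0 = s1 ∧ s1 = s2 ∧ s2 = s3 then "perfect"
     else if s0 = s1 ∧ s2 = s3 then "even"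
     else if s0 = s2 ∧ s1 = s3 then "cross"
     else if s0 = s3 ∧ s1 = s2 then "shell"
     else "free")
    = patTable.getD (([s0, s1, s2, s3].foldl patStep (PySem.Dict.empty, "")).2) "free" := by
  by_cases h01 : s0 = s1 <;> by_cases h02 : s0 = s2 <;> by_cases h03 : s0 = s3 <;>
  by_cases h12 : s1 = s2 <;> by_cases h13 : s1 = s3 <;> by_cases h23 : s2 = s3 <;>
  simp_all [patStep, patTable, List.foldl, PySem.Dict.getD_insert, PySem.Dict.contains_insert,
    PySem.Dict.contains_empty, PySem.Dict.size_insert, PySem.Dict.size_empty, @eq_comm String] <;>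
  decide

-- ===== VERDICT (by name: the statement is the Claim_ definition above) =====
theorem rhymes_spec : Claim_equal_rhymes := by
  unfold Claim_equal_rhymes
  intro verse _ hpre
  obtain ⟨hlen, -⟩ := hpre
  unfold Spec_rhymes
  match verse, hlen with
  | v0 :: v1 :: v2 :: v3 :: rest, _ =>
    unfold rhymes rhymes_alt
    rw [PySem.List.foldl_append_singleton_eq_map]
    simp only [List.map_cons, List.nil_append]
    simp [PySem.List.slice_to, PySem.List.pyGetD_ofNat']
    exact classify_eq _ _ _ _
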